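-- pv_equiv track=rewrite | github.com/elodwyer1/Unet_Application_to_Saturn_Kilometric_Radiation | 21_full_mission_contour_analysis.py | overlap_corners
-- ===== SOURCE A (Python) =====
-- def overlap_corners(x, y, n):
--   lefts = []
--   rights = []
--   left = x+y
--   right = left +2*y
--   lefts.append(left)
--   rights.append(right)
--   for i in range(2, n):
--     left  = right+x
--     right = left+2*y
--     lefts.append(left)
--     rights.append(right)
--   return lefts, rights
-- ===== SOURCE B (Python) =====
-- def overlap_corners(x, y, n):
--   count = max(1, n - 1)
--   lefts = [(j + 1) * x + (2 * j + 1) * y for j in range(count)]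
--   rights = [(j + 1) * x + (2 * j + 3) * y for j in range(count)]
--   return lefts, rights
-- ===== Notes on version B (the rewrite author's own statement) =====
-- stated objective: simpler
-- what changed: Replaces the stateful linear recurrence (threading left/right through a loop with appends) by a closed-form per-index comprehension over range(max(1, n-1)).
import Mathlib
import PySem

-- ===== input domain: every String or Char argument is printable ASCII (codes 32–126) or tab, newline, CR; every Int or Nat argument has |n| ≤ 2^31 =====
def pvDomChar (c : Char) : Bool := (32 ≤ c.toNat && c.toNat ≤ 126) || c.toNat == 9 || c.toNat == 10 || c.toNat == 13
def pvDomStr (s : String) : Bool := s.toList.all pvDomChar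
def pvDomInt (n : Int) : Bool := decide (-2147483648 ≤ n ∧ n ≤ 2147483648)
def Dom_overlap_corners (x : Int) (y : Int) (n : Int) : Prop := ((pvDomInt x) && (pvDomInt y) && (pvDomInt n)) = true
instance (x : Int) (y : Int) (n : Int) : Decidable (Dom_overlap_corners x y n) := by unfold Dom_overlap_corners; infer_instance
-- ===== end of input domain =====

-- B replaces A's stateful recurrence loop by a closed-form per-index comprehension (objective: simpler).

-- ===== PORT A =====
-- loop body of A: left = right + x; right = left + 2*y; append both (the range element is unused)
def pvStepA (x y : Int) (st : List Int × List Int × Int × Int) (_ : Int) : List Int × List Int × Int × Int :=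
  let l' := st.2.2.2 + x
  let r' := l' + 2 * y
  (st.1 ++ [l'], st.2.1 ++ [r'], l', r')

-- literal transliteration: two seeded appends, then 'for i in range(2, n)' threading (left, right)
def overlap_corners (x : Int) (y : Int) (n : Int) : List Int × List Int :=
  let left := x + y
  let right := left + 2 * y
  let st := (PySem.List.pyRange 2 n 1).foldl (pvStepA x y) ([left], [right], left, right)
  (st.1, st.2.1)

-- ===== PORT B =====
def overlap_corners_alt (x : Int) (y : Int) (n : Int) : List Int × List Int :=
  ((PySem.List.pyRange 0 (max 1 (n - 1)) 1).map (fun j => (j + 1) * x + (2 * j + 1) * y),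
   (PySem.List.pyRange 0 (max 1 (n - 1)) 1).map (fun j => (j + 1) * x + (2 * j + 3) * y))

-- ===== PRECONDITION & SPEC =====
def Spec_overlap_corners (x : Int) (y : Int) (n : Int) (out : List Int × List Int) : Prop := out = overlap_corners_alt x y n
instance (x : Int) (y : Int) (n : Int) (out : List Int × List Int) : Decidable (Spec_overlap_corners x y n out) := by unfold Spec_overlap_corners; infer_instance

-- ===== CLAIM (what is proved, stated in full; the proofs are below) =====
def Claim_equal_overlap_corners : Prop := ∀ (x : Int) (y : Int) (n : Int), Dom_overlap_corners x y n → Spec_overlap_corners x y n (overlap_corners x y n)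

-- ===== LEMMAS AND PROOFS =====

-- closed forms for the j-th (0-based) left/right values of A's recurrence
def pvL (x y : Int) (j : Nat) : Int := ((j : Int) + 1) * x + (2 * (j : Int) + 1) * y
def pvR (x y : Int) (j : Nat) : Int := ((j : Int) + 1) * x + (2 * (j : Int) + 3) * y

def pvState (x y : Int) (j : Nat) : List Int × List Int × Int × Int :=
  ((List.range (j + 1)).map (pvL x y), (List.range (j + 1)).map (pvR x y), pvL x y j, pvR x y j)

theorem pvStepA_state (x y : Int) (j : Nat) (a : Int) :
    pvStepA x y (pvState x y j) a = pvState x y (j + 1) := by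
  simp only [pvStepA, pvState, pvL, pvR, List.range_succ (n := j + 1), List.map_append,
    List.map_cons, List.map_nil, Prod.mk.injEq]
  push_cast
  exact ⟨by ring_nf, by ring_nf, by ring, by ring⟩

-- A's loop advances the closed-form state by one per element
theorem pv_fold_state (x y : Int) (l : List Int) (j : Nat) :
    l.foldl (pvStepA x y) (pvState x y j) = pvState x y (j + l.length) := by
  induction l generalizing j with
  | nil => simp
  | cons a t ih =>
    simp only [List.foldl_cons, pvStepA_state, ih (j + 1), List.length_cons]
    ring_nf

theorem overlap_corners_eq_closed (x y n : Int) :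
    overlap_corners x y n
      = ((List.range ((n - 2).toNat + 1)).map (pvL x y),
         (List.range ((n - 2).toNat + 1)).map (pvR x y)) := by
  have h0 : (([x + y], [x + y + 2 * y], x + y, x + y + 2 * y) : List Int × List Int × Int × Int)
      = pvState x y 0 := by
    simp only [pvState, pvL, pvR, Nat.zero_add, Nat.cast_zero, List.range_one, List.map_cons,
      List.map_nil, Prod.mk.injEq, List.cons.injEq, and_true]
    exact ⟨by ring, by ring, by ring, by ring⟩
  simp only [overlap_corners, h0]
  rw [pv_fold_state, PySem.List.length_pyRange_one]
  simp only [pvState, Nat.zero_add]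

theorem overlap_corners_eq_alt (x y n : Int) :
    overlap_corners x y n = overlap_corners_alt x y n := by
  rw [overlap_corners_eq_closed]
  unfold overlap_corners_alt
  rw [PySem.List.pyRange_one]
  have hc : (max 1 (n - 1) - 0).toNat = (n - 2).toNat + 1 := by omega
  rw [hc]
  simp only [List.map_map, Prod.mk.injEq]
  constructor <;>
  · apply List.map_congr_left
    intro k _
    simp only [Function.comp, pvL, pvR]
    ring

-- ===== VERDICT (by name: the statement is the Claim_ definition above) =====
theorem overlap_corners_spec : Claim_equal_overlap_corners := by
  intro x y n _
  exact overlap_corners_eq_alt x y n
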